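-- pv_equiv track=rewrite | github.com/TomekWojdyla/pp1 | 05-Test1/mock/05/p4.py | f
-- ===== SOURCE A (Python) =====
-- def f(card_no):
--     card_str = str(card_no)
--     lent = len(card_str)
--     disp = ""
--     selection = [0,1,lent-4,lent-3,lent-2,lent-1]
--     for i in range(0,lent):
--         if i in selection:
--             disp += card_str[i]
--         else:
--             disp += "*"
--     return disp
-- ===== SOURCE B (Python) =====
-- def f(card_no):
--     card_str = str(card_no)
--     n = len(card_str)
--     return card_str[:2] + "*" * max(0, n - 6) + card_str[max(2, n - 4):]
-- ===== Notes on version B (the rewrite author's own statement) =====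
-- stated objective: idiomatic
-- what changed: Replaces the per-index loop with its membership test against the selection list by a single concatenation of three slices: the first two characters, a clamped run of '*', and the clamped last-four tail.
import Mathlib
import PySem

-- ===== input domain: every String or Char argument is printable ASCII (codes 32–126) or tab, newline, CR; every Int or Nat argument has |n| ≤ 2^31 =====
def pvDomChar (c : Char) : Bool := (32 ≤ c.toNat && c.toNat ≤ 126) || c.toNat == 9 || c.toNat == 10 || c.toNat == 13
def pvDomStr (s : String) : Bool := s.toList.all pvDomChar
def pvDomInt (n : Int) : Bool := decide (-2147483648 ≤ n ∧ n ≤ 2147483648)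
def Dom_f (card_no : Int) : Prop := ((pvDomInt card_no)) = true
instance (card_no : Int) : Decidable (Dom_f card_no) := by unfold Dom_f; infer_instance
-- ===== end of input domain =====

-- B replaces A's per-index loop with a membership test by one concatenation of three slices (idiomatic).

-- ===== PORT A =====
def f (card_no : Int) : String :=
  let cardStr : List Char := PySem.Int.toChars card_no
  let lent : Int := cardStr.length
  let selection : List Int := [0, 1, lent - 4, lent - 3, lent - 2, lent - 1]
  let disp : List Char :=
    (PySem.List.pyRange 0 lent 1).foldl
      (fun acc i =>
        if i ∈ selection then acc ++ (PySem.List.pyGet? cardStr i).toList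
        else acc ++ ['*']) []
  String.ofList disp

-- ===== PORT B =====
def f_alt (card_no : Int) : String :=
  let cardStr : List Char := PySem.Int.toChars card_no
  let n : Int := cardStr.length
  String.ofList (PySem.List.slice cardStr none (some 2)
    ++ PySem.List.pyRepeat ['*'] (max 0 (n - 6))
    ++ PySem.List.slice cardStr (some (max 2 (n - 4))) none)

-- ===== PRECONDITION & SPEC =====
def Spec_f (card_no : Int) (out : String) : Prop := out = f_alt card_no
instance (card_no : Int) (out : String) : Decidable (Spec_f card_no out) := by unfold Spec_f; infer_instance

-- ===== CLAIM (what is proved, stated in full; the proofs are below) =====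
def Claim_equal_f : Prop := ∀ (card_no : Int), Dom_f card_no → Spec_f card_no (f card_no)

-- ===== LEMMAS AND PROOFS =====

-- the core fact, over an arbitrary character list
lemma mask_eq (cs : List Char) :
    (PySem.List.pyRange 0 (cs.length : Int) 1).foldl
      (fun acc i =>
        if i ∈ [(0 : Int), 1, (cs.length : Int) - 4, (cs.length : Int) - 3,
                (cs.length : Int) - 2, (cs.length : Int) - 1] then
          acc ++ (PySem.List.pyGet? cs i).toList
        else acc ++ ['*']) []
    = PySem.List.slice cs none (some 2)
      ++ PySem.List.pyRepeat ['*'] (max 0 ((cs.length : Int) - 6))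
      ++ PySem.List.slice cs (some (max 2 ((cs.length : Int) - 4))) none := by
  set n := cs.length with hn
  rw [PySem.List.pyRange_zero_natCast, List.foldl_map,
      PySem.List.slice_to cs (by omega : (0:Int) ≤ 2),
      PySem.List.slice_from cs (by omega : (0:Int) ≤ max 2 ((n:Int) - 4)),
      PySem.List.pyRepeat_singleton]
  have hbody : ∀ (acc : List Char), ∀ j ∈ List.range n,
      (if ((j : Int) ∈ [(0 : Int), 1, (n : Int) - 4, (n : Int) - 3, (n : Int) - 2, (n : Int) - 1])
        then acc ++ (PySem.List.pyGet? cs (j : Int)).toList else acc ++ ['*'])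
      = acc ++ [if ((j : Int) ∈ [(0 : Int), 1, (n : Int) - 4, (n : Int) - 3, (n : Int) - 2, (n : Int) - 1]) then cs.getD j '*' else '*'] := by
    intro acc j hj
    rw [List.mem_range] at hj
    split_ifs with h
    · rw [PySem.List.pyGet?_natCast, List.getElem?_eq_getElem (by omega), List.getD_eq_getElem cs '*' (by omega)]
      rfl
    · rfl
  have step := PySem.List.foldl_congr_mem (List.range n) _
    (fun (acc : List Char) (j : Nat) => acc ++ [if ((j : Int) ∈ [(0 : Int), 1, (n : Int) - 4, (n : Int) - 3, (n : Int) - 2, (n : Int) - 1]) then cs.getD j '*' else '*']) [] hbody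
  rw [step, PySem.List.foldl_append_singleton_eq_map, List.nil_append]
  have h2 : Int.toNat 2 = 2 := rfl
  rw [h2]
  set K := (max 0 ((n:Int) - 6)).toNat with hKdef
  set M := (max 2 ((n:Int) - 4)).toNat with hMdef
  have hK : K = n - 6 := by omega
  have hM : M = max 2 (n - 4) := by omega
  apply List.ext_getElem
  · simp
    omega
  · intro i hi1 hi2
    simp only [List.getElem_map, List.getElem_range]
    simp only [List.length_map, List.length_range] at hi1
    by_cases hA : i < min 2 n
    · rw [List.getElem_append_left (by simp; omega), List.getElem_append_left (by simp; omega),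
          List.getElem_take]
      rw [if_pos, List.getD_eq_getElem cs '*' (by omega)]
      simp only [List.mem_cons, List.not_mem_nil, or_false]
      omega
    · by_cases hB : i < min 2 n + K
      · rw [List.getElem_append_left (by simp; omega), List.getElem_append_right (by simp; omega),
            List.getElem_replicate]
        rw [if_neg]
        simp only [List.mem_cons, List.not_mem_nil, or_false]
        omega
      · rw [List.getElem_append_right (by simp; omega), List.getElem_drop]
        simp only [List.length_append, List.length_take, List.length_replicate]
        rw [if_pos]
        · have hidx : M + (i - (min 2 cs.length + K)) = i := by omega
          rw [List.getD_eq_getElem cs '*' (by omega)]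
          simp only [hidx]
        · simp only [List.mem_cons, List.not_mem_nil, or_false]
          omega

theorem f_spec : Claim_equal_f := by
  intro card_no _
  unfold Spec_f f f_alt
  simp only []
  rw [mask_eq]
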